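-- pv_equiv track=rewrite | github.com/ynyeh0221/Codewars | 5-kyu/WordSquare.py | word_square
-- ===== SOURCE A (Python) =====
-- import math
--
-- def word_square(letters):
--     length = int(math.sqrt(len(letters)))
--     if length ** 2 != len(letters):
--         return False
--     dic = {}
--     for i in letters:
--         if i not in dic:
--             dic[i] = 0
--         dic[i] += 1
--     odd = 0
--     for i in dic:
--         if dic[i] % 2 == 1:
--             odd += 1
--         if odd > length:
--             return False
--     return True
-- ===== SOURCE B (Python) =====
-- import math
-- from itertools import groupby
--
--
-- def word_square(letters):
--     length = int(math.sqrt(len(letters)))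
--     if length ** 2 != len(letters):
--         return False
--     odd = sum(sum(1 for _ in g) % 2 for _, g in groupby(sorted(letters)))
--     return odd <= length
-- ===== Notes on version B (the rewrite author's own statement) =====
-- stated objective: alternative
-- what changed: Replaces the hand-built frequency dict and early-exit parity loop with sorting the letters and counting odd-length runs via itertools.groupby, comparing that odd count to the side length.
import Mathlib
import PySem

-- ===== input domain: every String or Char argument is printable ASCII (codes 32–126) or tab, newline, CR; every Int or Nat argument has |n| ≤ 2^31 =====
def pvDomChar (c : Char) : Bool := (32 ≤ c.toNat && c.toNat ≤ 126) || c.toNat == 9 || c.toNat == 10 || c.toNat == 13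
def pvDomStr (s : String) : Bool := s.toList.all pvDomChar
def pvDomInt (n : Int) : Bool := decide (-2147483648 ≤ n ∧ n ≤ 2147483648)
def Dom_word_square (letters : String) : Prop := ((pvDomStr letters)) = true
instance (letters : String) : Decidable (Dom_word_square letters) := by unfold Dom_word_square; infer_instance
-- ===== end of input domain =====

-- B replaces A's frequency dict and early-exit parity loop by sorting the letters and
-- counting odd-length runs of equal letters (itertools.groupby); same return value, no speed claim.

-- ===== PORT A =====
-- the 'for i in dic: …' loop with its early 'return False'
def wsLoop (length : Int) (d : PySem.Dict Char Int) : List Char → Int → Bool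
  | [], _ => true
  | i :: rest, odd =>
    let odd' := if PySem.Int.mod (d.getD i 0) 2 == 1 then odd + 1 else odd
    if odd' > length then false else wsLoop length d rest odd'

-- int(math.sqrt(len(letters))) is ported as Nat.sqrt (exact integer square root)
def word_square (letters : String) : Bool :=
  let length : Int := ((Nat.sqrt (PySem.Str.len letters).toNat : Nat) : Int)
  if length ^ 2 ≠ PySem.Str.len letters then false
  else
    let dic := letters.toList.foldl
      (fun d i => (if d.contains i then d else d.insert i 0).modify i 0 (· + 1))
      (PySem.Dict.empty : PySem.Dict Char Int)
    wsLoop length dic dic.keys 0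

-- ===== PORT B =====
-- sum(sum(1 for _ in g) % 2 for _, g in groupby(sorted(letters))): odd-length runs of the sorted list
def oddRuns : List Char → Nat
  | [] => 0
  | c :: t => (1 + (t.takeWhile (· == c)).length) % 2 + oddRuns (t.dropWhile (· == c))
  termination_by l => l.length
  decreasing_by
    have := List.length_dropWhile_le (· == c) t
    simp
    omega

def word_square_alt (letters : String) : Bool :=
  let length : Int := ((Nat.sqrt (PySem.Str.len letters).toNat : Nat) : Int)
  if length ^ 2 ≠ PySem.Str.len letters then false
  else decide ((oddRuns (PySem.List.sorted letters.toList (fun x => x)) : Int) ≤ length)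

-- ===== PRECONDITION & SPEC =====
def Spec_word_square (letters : String) (out : Bool) : Prop := out = word_square_alt letters
instance (letters : String) (out : Bool) : Decidable (Spec_word_square letters out) := by unfold Spec_word_square; infer_instance

-- ===== CLAIM (what is proved, stated in full; the proofs are below) =====
def Claim_equal_word_square : Prop := ∀ (letters : String), Dom_word_square letters → Spec_word_square letters (word_square letters)

-- ===== LEMMAS AND PROOFS =====

-- A's per-letter dict update (ensure the key, then += 1) is exactly Counter's update step
theorem ws_step_eq (d : PySem.Dict Char Int) (i : Char) :
    (if d.contains i then d else d.insert i 0).modify i 0 (· + 1)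
      = d.modify i 0 (· + 1) := by
  by_cases h : d.contains i = true
  · simp [h]
  · have h' : d.contains i = false := by simpa using h
    have hall : ∀ p ∈ d.items, ¬((p.1 == i) = true) := by
      simpa [PySem.Dict.contains, List.any_eq_false] using h'
    have hmap' : List.map (fun p => if p.1 = i then (i, (1 : Int)) else p) d.items = d.items := by
      rw [List.map_congr_left (g := id) (fun a ha => by
        have hne : ¬ a.1 = i := by simpa using hall a ha
        simp [hne])]
      exact List.map_id _
    have hfind : d.items.find? (fun p => p.1 == i) = none := List.find?_eq_none.mpr hall
    have h4 : d.getD i 0 = 0 := by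
      simp [PySem.Dict.getD, PySem.Dict.get?, hfind]
    have h1 : d.insert i 0 = ⟨d.items ++ [(i, 0)]⟩ := by
      simp [PySem.Dict.insert, h']
    have h3 : (⟨d.items ++ [(i, 0)]⟩ : PySem.Dict Char Int).getD i 0 = 0 := by
      simp [PySem.Dict.getD, PySem.Dict.get?, List.find?_append, hfind]
    have h2 : (⟨d.items ++ [(i, 0)]⟩ : PySem.Dict Char Int).insert i 1 = ⟨d.items ++ [(i, 1)]⟩ := by
      have hc : (⟨d.items ++ [(i, 0)]⟩ : PySem.Dict Char Int).contains i = true := by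
        simp [PySem.Dict.contains]
      simp [PySem.Dict.insert, hc, List.map_append, hmap']
    simp only [h', Bool.false_eq_true, if_false, PySem.Dict.modify, h1, h3, h4]
    simp [PySem.Dict.insert, h', hmap']

-- A's dict is Counter(letters)
theorem ws_dic_eq (l : List Char) :
    l.foldl (fun d i => (if d.contains i then d else d.insert i 0).modify i 0 (· + 1))
        (PySem.Dict.empty : PySem.Dict Char Int)
      = PySem.Dict.counter l := by
  have hstep : (fun (d : PySem.Dict Char Int) i =>
      (if d.contains i then d else d.insert i 0).modify i 0 (· + 1))
      = fun d i => d.modify i 0 (· + 1) :=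
    funext fun d => funext fun i => ws_step_eq d i
  rw [hstep]
  rfl

-- A's parity loop with early exit equals one comparison of the total odd count
theorem wsLoop_eq (length : Int) (d : PySem.Dict Char Int) :
    ∀ (ks : List Char) (odd : Int), odd ≤ length →
      wsLoop length d ks odd
        = decide (odd + (ks.countP (fun k => PySem.Int.mod (d.getD k 0) 2 == 1) : Int) ≤ length) := by
  intro ks
  induction ks with
  | nil =>
    intro odd h
    have h0 : wsLoop length d [] odd = true := rfl
    rw [h0, List.countP_nil]
    symm
    rw [decide_eq_true_eq]
    push_cast
    omega
  | cons i rest ih =>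
    intro odd h
    have hunfold : wsLoop length d (i :: rest) odd
        = (if (if PySem.Int.mod (d.getD i 0) 2 == 1 then odd + 1 else odd) > length then false
           else wsLoop length d rest
             (if PySem.Int.mod (d.getD i 0) 2 == 1 then odd + 1 else odd)) := rfl
    rw [hunfold, List.countP_cons]
    by_cases hp : (PySem.Int.mod (d.getD i 0) 2 == 1) = true
    · rw [if_pos hp, if_pos hp]
      by_cases hlt : odd + 1 > length
      · rw [if_pos hlt]
        symm
        rw [decide_eq_false_iff_not]
        push_cast
        omega
      · rw [if_neg hlt, ih (odd + 1) (by omega)]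
        apply decide_eq_decide.mpr
        push_cast
        omega
    · rw [if_neg hp, if_neg hp, if_neg (by omega : ¬ odd > length), ih odd h]
      apply decide_eq_decide.mpr
      push_cast
      omega

-- the Int parity test on a counted value is the Nat parity test
theorem ws_pred_eq (m : Nat) :
    (PySem.Int.mod (m : Int) 2 == 1) = decide (m % 2 = 1) := by
  have h2 : PySem.Int.mod (m : Int) 2 = ((m % 2 : Nat) : Int) := by
    exact_mod_cast PySem.Int.mod_natCast m 2
  rw [h2]
  rcases Nat.mod_two_eq_zero_or_one m with hm | hm <;> rw [hm] <;> decide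

-- countP over a duplicate-free list is a Finset-filter cardinality
theorem ws_countP_nodup (xs : List Char) (p : Char → Bool) (h : xs.Nodup) :
    xs.countP p = (xs.toFinset.filter (fun c => p c = true)).card := by
  rw [List.countP_eq_length_filter, ← List.toFinset_card_of_nodup (h.filter p),
    List.toFinset_filter]

theorem ws_ofList_toFinset (xs : List Char) :
    (PySem.Set.ofList xs).toFinset = xs.toFinset := by
  ext x
  simp [List.mem_toFinset, PySem.Set.mem_ofList]

-- the number of odd-length runs of a sorted list = number of letters with odd multiplicity
theorem ws_oddRuns_sorted (l : List Char) (h : l.Pairwise (· ≤ ·)) :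
    oddRuns l = (l.toFinset.filter (fun x => decide (l.count x % 2 = 1) = true)).card := by
  induction l using oddRuns.induct with
  | case1 => simp [oddRuns]
  | case2 c t ih =>
    have hct : ∀ x ∈ t, c ≤ x := (List.pairwise_cons.mp h).1
    have ht : t.Pairwise (· ≤ ·) := (List.pairwise_cons.mp h).2
    set t1 := t.takeWhile (· == c) with ht1
    set t2 := t.dropWhile (· == c) with ht2
    have hsplit : t1 ++ t2 = t := List.takeWhile_append_dropWhile
    have ht2p : t2.Pairwise (· ≤ ·) := List.Pairwise.sublist (List.dropWhile_sublist _) ht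
    have ht1c : ∀ x ∈ t1, x = c := by
      intro x hx
      have hb : (x == c) = true := List.mem_takeWhile_imp (p := (· == c)) hx
      exact eq_of_beq hb
    have hc2 : c ∉ t2 := by
      cases hcase : t2 with
      | nil => simp
      | cons dd r =>
        have hh : t.dropWhile (· == c) = dd :: r := by rw [← ht2]; exact hcase
        have hne : t.dropWhile (· == c) ≠ [] := by rw [hh]; simp
        have hd0 := List.head_dropWhile_not (· == c) hne
        have hd : (dd == c) = false := by
          simpa [hh] using hd0
        have hdt : dd ∈ t := (List.dropWhile_sublist _).mem (by rw [hh]; simp)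
        have hcd : c < dd := lt_of_le_of_ne (hct dd hdt) (fun he => by simp [← he] at hd)
        intro hmem
        rcases List.mem_cons.mp hmem with h1 | h1
        · exact absurd h1 (ne_of_lt hcd)
        · have hge : dd ≤ c := (List.pairwise_cons.mp (hcase ▸ ht2p)).1 c h1
          exact absurd hcd (not_lt.mpr hge)
    have hcount_c : (c :: t).count c = t1.length + 1 := by
      rw [List.count_cons_self]
      have he : t.count c = t1.count c + t2.count c := by
        rw [← hsplit, List.count_append]
      have h1 : t1.count c = t1.length :=
        List.count_eq_length.mpr (fun b hb => (ht1c b hb).symm)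
      have h2 : t2.count c = 0 := List.count_eq_zero.mpr hc2
      omega
    have hcount_ne : ∀ x, x ≠ c → (c :: t).count x = t2.count x := by
      intro x hx
      rw [List.count_cons_of_ne (Ne.symm hx)]
      rw [← hsplit, List.count_append]
      have : t1.count x = 0 := List.count_eq_zero.mpr (fun hm => hx (ht1c x hm))
      omega
    have hfin : (c :: t).toFinset = insert c t2.toFinset := by
      ext x
      simp only [List.mem_toFinset, List.mem_cons, Finset.mem_insert]
      constructor
      · rintro (h1 | h1)
        · exact Or.inl h1
        · rw [← hsplit] at h1
          rcases List.mem_append.mp h1 with h2 | h2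
          · exact Or.inl (ht1c x h2)
          · exact Or.inr (by simpa using h2)
      · rintro (h1 | h1)
        · exact Or.inl h1
        · refine Or.inr ?_
          rw [← hsplit]
          exact List.mem_append.mpr (Or.inr (by simpa using h1))
    have hcnot : c ∉ t2.toFinset := by simpa using hc2
    have hfilter : t2.toFinset.filter (fun x => decide ((c :: t).count x % 2 = 1) = true)
        = t2.toFinset.filter (fun x => decide (t2.count x % 2 = 1) = true) := by
      apply Finset.filter_congr
      intro x hx
      have hxc : x ≠ c := fun he => hcnot (he ▸ hx)
      rw [hcount_ne x hxc]
    simp only [oddRuns]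
    rw [hfin, Finset.filter_insert, ← ht1, ← ht2, ih ht2p]
    by_cases hodd : (1 + t1.length) % 2 = 1
    · have hpc : decide ((c :: t).count c % 2 = 1) = true := by
        rw [hcount_c]
        simpa using (by omega : (t1.length + 1) % 2 = 1)
      rw [if_pos hpc,
        Finset.card_insert_of_notMem (fun hm => hcnot (Finset.mem_of_mem_filter _ hm)), hfilter]
      omega
    · have hpc : ¬ (decide ((c :: t).count c % 2 = 1) = true) := by
        rw [hcount_c]
        simpa using (by omega : ¬ (t1.length + 1) % 2 = 1)
      rw [if_neg hpc, hfilter]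
      omega

-- ===== VERDICT (by name: the statement is the Claim_ definition above) =====
theorem word_square_spec : Claim_equal_word_square := by
  intro letters _
  unfold Spec_word_square word_square word_square_alt
  by_cases hg : (((Nat.sqrt (PySem.Str.len letters).toNat : Nat) : Int)) ^ 2 ≠ PySem.Str.len letters
  · rw [if_pos hg, if_pos hg]
  · rw [if_neg hg, if_neg hg]
    rw [ws_dic_eq]
    change wsLoop _ (PySem.Dict.counter letters.toList) (PySem.Dict.counter letters.toList).keys 0 = _
    rw [PySem.Dict.keys_counter]
    rw [wsLoop_eq _ _ _ 0 (Int.natCast_nonneg _)]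
    have hpred : (fun k => PySem.Int.mod ((PySem.Dict.counter letters.toList).getD k 0) 2 == 1)
        = fun k => decide (letters.toList.count k % 2 = 1) := by
      funext k
      rw [PySem.Dict.getD_counter, ws_pred_eq]
    rw [hpred]
    rw [ws_countP_nodup _ _ (PySem.Set.nodup_ofList letters.toList), ws_ofList_toFinset]
    have hsorted : (PySem.List.sorted letters.toList (fun x => x)).Pairwise (· ≤ ·) :=
      PySem.List.sorted_pairwise letters.toList (fun x => x)
    rw [ws_oddRuns_sorted _ hsorted]
    have hperm : (PySem.List.sorted letters.toList (fun x => x)).Perm letters.toList :=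
      PySem.List.sorted_perm letters.toList (fun x => x) false
    have hfs : (PySem.List.sorted letters.toList (fun x => x)).toFinset = letters.toList.toFinset :=
      List.toFinset_eq_of_perm _ _ hperm
    rw [hfs]
    have hcnt : letters.toList.toFinset.filter
          (fun x => decide ((PySem.List.sorted letters.toList (fun x => x)).count x % 2 = 1) = true)
        = letters.toList.toFinset.filter (fun x => decide (letters.toList.count x % 2 = 1) = true) := by
      apply Finset.filter_congr
      intro x hx
      rw [hperm.count_eq x]
    rw [hcnt]
    apply decide_eq_decide.mpr
    omega
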